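-- pv_equiv track=rewrite | github.com/Chans-cellar/Hermoz_BackEnd | application.py | calculate_weighted_sum
-- ===== SOURCE A (Python) =====
-- def calculate_weighted_sum(keywords):
--     # Define the keyword weights
--     keyword_weights = {
--         'financial': 40, 'monetary': 40, 'economic': 40, 'GDP': 40, 'inflation': 40,
--         'unemployment': 40, 'fiscal': 40, 'trade': 40, 'prices': 30, 'price': 30, 'market': 30,
--         'rate': 20, 'rates': 20, 'imports': 20, 'export': 20, 'exports': 20, 'revenue': 20, 'expenditure': 10,
--         'debt': 20,
--         'growth': 10, 'cent': 10, 'rs': 10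
--     }
--     """Calculate the weighted sum of the keywords"""
--     weighted_sum = 0
--     for keyword in keywords:
--         if keyword in keyword_weights:
--             weighted_sum += keyword_weights[keyword]
--     return weighted_sum
-- ===== SOURCE B (Python) =====
-- def calculate_weighted_sum(keywords):
--     """Calculate the weighted sum of the keywords"""
--     tiers = (
--         (40, {'financial', 'monetary', 'economic', 'GDP', 'inflation',
--               'unemployment', 'fiscal', 'trade'}),
--         (30, {'prices', 'price', 'market'}),
--         (20, {'rate', 'rates', 'imports', 'export', 'exports', 'revenue', 'debt'}),
--         (10, {'expenditure', 'growth', 'cent', 'rs'}),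
--     )
--     return sum(w * sum(1 for kw in keywords if kw in tier) for w, tier in tiers)
-- ===== Notes on version B (the rewrite author's own statement) =====
-- stated objective: alternative
-- what changed: B groups the weight table into four equal-weight tiers and returns sum over tiers of weight * (count of input keywords in the tier), instead of A's single pass over the input testing membership in one dict and accumulating.
import Mathlib
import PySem

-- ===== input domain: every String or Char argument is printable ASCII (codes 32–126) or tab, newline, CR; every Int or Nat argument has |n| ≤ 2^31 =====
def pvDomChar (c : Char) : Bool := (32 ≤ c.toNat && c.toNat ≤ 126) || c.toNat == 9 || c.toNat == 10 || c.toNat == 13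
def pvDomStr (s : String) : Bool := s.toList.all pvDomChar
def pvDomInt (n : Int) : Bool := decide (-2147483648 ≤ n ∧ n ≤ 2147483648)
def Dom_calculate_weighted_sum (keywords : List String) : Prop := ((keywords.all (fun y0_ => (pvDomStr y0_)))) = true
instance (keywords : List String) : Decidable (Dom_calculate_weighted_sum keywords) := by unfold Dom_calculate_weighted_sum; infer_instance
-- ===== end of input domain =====

-- B groups the weights into four equal-weight tier sets and sums weight * (count of input keywords in the tier) — an alternative decomposition, same cost.
-- ===== PORT A =====
def pvWeights : PySem.Dict String Int :=
  PySem.Dict.ofList [("financial", 40), ("monetary", 40), ("economic", 40), ("GDP", 40), ("inflation", 40), ("unemployment", 40), ("fiscal", 40), ("trade", 40), ("prices", 30), ("price", 30), ("market", 30), ("rate", 20), ("rates", 20), ("imports", 20), ("export", 20), ("exports", 20), ("revenue", 20), ("expenditure", 10), ("debt", 20), ("growth", 10), ("cent", 10), ("rs", 10)]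

def calculate_weighted_sum (keywords : List String) : Int :=
  keywords.foldl (fun weighted_sum keyword =>
    if pvWeights.contains keyword then weighted_sum + pvWeights.getD keyword 0
    else weighted_sum) 0

-- ===== PORT B =====
def pvTiers : List (Int × PySem.Set String) :=
  [(40, PySem.Set.ofList ["financial", "monetary", "economic", "GDP", "inflation", "unemployment", "fiscal", "trade"]),
   (30, PySem.Set.ofList ["prices", "price", "market"]),
   (20, PySem.Set.ofList ["rate", "rates", "imports", "export", "exports", "revenue", "debt"]),
   (10, PySem.Set.ofList ["expenditure", "growth", "cent", "rs"])]

def calculate_weighted_sum_alt (keywords : List String) : Int :=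
  (pvTiers.map (fun t => t.1 * ((keywords.countP (fun kw => t.2.contains kw) : Nat) : Int))).sum

-- ===== PRECONDITION & SPEC =====
def Spec_calculate_weighted_sum (keywords : List String) (out : Int) : Prop := out = calculate_weighted_sum_alt keywords
instance (keywords : List String) (out : Int) : Decidable (Spec_calculate_weighted_sum keywords out) := by unfold Spec_calculate_weighted_sum; infer_instance

-- ===== CLAIM (what is proved, stated in full; the proofs are below) =====
def Claim_equal_calculate_weighted_sum : Prop := ∀ (keywords : List String), Dom_calculate_weighted_sum keywords → Spec_calculate_weighted_sum keywords (calculate_weighted_sum keywords)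

-- ===== LEMMAS AND PROOFS =====

-- A's per-keyword contribution
def pvAW (k : String) : Int := if pvWeights.contains k then pvWeights.getD k 0 else 0

theorem pvA_eq_sum (keywords : List String) :
    calculate_weighted_sum keywords = (keywords.map pvAW).sum := by
  unfold calculate_weighted_sum
  exact (PySem.List.foldl_congr_mem keywords _ (fun acc x => acc + pvAW x) 0
      (by intro acc x _; unfold pvAW; by_cases h : pvWeights.contains x <;> simp [h])).trans
    (by simpa using PySem.List.foldl_add keywords pvAW 0)

-- B's per-keyword contribution across the four tiers
def pvBW (k : String) : Int :=
  (pvTiers.map (fun t => t.1 * (if t.2.contains k then (1 : Int) else 0))).sum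

theorem pvB_eq_sum (keywords : List String) :
    calculate_weighted_sum_alt keywords = (keywords.map pvBW).sum := by
  unfold calculate_weighted_sum_alt
  induction keywords with
  | nil => simp
  | cons k kws ih =>
    have hstep : (pvTiers.map (fun t => t.1 * (((k :: kws).countP (fun kw => t.2.contains kw) : Nat) : Int))).sum
        = (pvTiers.map (fun t => t.1 * ((kws.countP (fun kw => t.2.contains kw) : Nat) : Int))).sum + pvBW k := by
      unfold pvBW
      rw [← List.sum_map_add]
      refine congrArg List.sum (List.map_congr_left ?_)
      intro t _
      simp only [List.countP_cons]
      by_cases h : k ∈ t.2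
      · simp [h]; ring
      · simp [h]
    rw [hstep, ih]
    simp [add_comm]

-- the tier contribution of k equals A's weight for k
theorem pvBW_eq_pvAW (k : String) : pvBW k = pvAW k := by
  by_cases h0 : k = "financial"
  · subst h0; decide
  by_cases h1 : k = "monetary"
  · subst h1; decide
  by_cases h2 : k = "economic"
  · subst h2; decide
  by_cases h3 : k = "GDP"
  · subst h3; decide
  by_cases h4 : k = "inflation"
  · subst h4; decide
  by_cases h5 : k = "unemployment"
  · subst h5; decide
  by_cases h6 : k = "fiscal"
  · subst h6; decide
  by_cases h7 : k = "trade"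
  · subst h7; decide
  by_cases h8 : k = "prices"
  · subst h8; decide
  by_cases h9 : k = "price"
  · subst h9; decide
  by_cases h10 : k = "market"
  · subst h10; decide
  by_cases h11 : k = "rate"
  · subst h11; decide
  by_cases h12 : k = "rates"
  · subst h12; decide
  by_cases h13 : k = "imports"
  · subst h13; decide
  by_cases h14 : k = "export"
  · subst h14; decide
  by_cases h15 : k = "exports"
  · subst h15; decide
  by_cases h16 : k = "revenue"
  · subst h16; decide
  by_cases h17 : k = "expenditure"
  · subst h17; decide
  by_cases h18 : k = "debt"
  · subst h18; decide
  by_cases h19 : k = "growth"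
  · subst h19; decide
  by_cases h20 : k = "cent"
  · subst h20; decide
  by_cases h21 : k = "rs"
  · subst h21; decide
  simp [pvBW, pvTiers, pvAW, pvWeights, PySem.Set.ofList, PySem.Set.contains,
    PySem.Dict.contains, PySem.Dict.ofList, PySem.Dict.update, PySem.Dict.insert, PySem.Dict.empty,
    Ne.symm h0, Ne.symm h1, Ne.symm h2, Ne.symm h3, Ne.symm h4, Ne.symm h5, Ne.symm h6, Ne.symm h7,
    Ne.symm h8, Ne.symm h9, Ne.symm h10, Ne.symm h11, Ne.symm h12, Ne.symm h13, Ne.symm h14,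
    Ne.symm h15, Ne.symm h16, Ne.symm h17, Ne.symm h18, Ne.symm h19, Ne.symm h20, Ne.symm h21,
    h0, h1, h2, h3, h4, h5, h6, h7, h8, h9, h10, h11, h12, h13, h14, h15, h16, h17, h18, h19, h20, h21]

-- ===== VERDICT (by name: the statement is the Claim_ definition above) =====
theorem calculate_weighted_sum_spec : Claim_equal_calculate_weighted_sum := by
  intro keywords _
  unfold Spec_calculate_weighted_sum
  rw [pvA_eq_sum, pvB_eq_sum]
  exact congrArg List.sum (List.map_congr_left (fun k _ => (pvBW_eq_pvAW k).symm))
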